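-- pv_equiv track=rewrite | github.com/apostaremczak/advent-of-code | 2020-python/solutions/day_21_allergen_assessment.py | part_1
-- ===== SOURCE A (Python) =====
-- from collections import Counter, defaultdict
-- from typing import Dict, List, Tuple, Set
--
-- Ingredient = str
--
-- Allergen = str
--
-- Food = Tuple[List[Ingredient], List[Allergen]]
--
-- def get_potentially_allergic_ingredients(food_list: List[Food]) -> Dict[Allergen, Set[Ingredient]]:
--     allergen_ingredients = {}
--     for ingredients, allergens in food_list:
--         for allergen in allergens:
--             allergen_ingredients[allergen] = allergen_ingredients.get(allergen, set(ingredients)) & set(ingredients)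
--     return allergen_ingredients
--
-- def part_1(food_list: List[Food]) -> int:
--     ingredient_counts = Counter()
--     for ingredients, _ in food_list:
--         ingredient_counts.update(ingredients)
--
--     allergen_ingredients = get_potentially_allergic_ingredients(food_list)
--     unsafe_ingredients = set.union(*[v for v in allergen_ingredients.values()])
--     return sum(
--         count
--         for ingredient, count in ingredient_counts.items()
--         if ingredient not in unsafe_ingredients
--     )
-- ===== SOURCE B (Python) =====
-- def part_1(food_list):
--     # An ingredient is "unsafe" iff some allergen occurs on a food whose ingredient
--     # list, intersected over every food listing that allergen, still contains it —
--     # i.e. iff there exists an allergen a such that the ingredient appears in EVERY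
--     # food listing a.  B checks that logical definition directly, with no sets,
--     # no intersections and no frequency table.
--     def unsafe(ingredient):
--         return any(
--             all(ingredient in ings for ings, als in food_list if a in als)
--             for _, allergens in food_list
--             for a in allergens
--         )
--     return sum(1 for ings, _ in food_list for i in ings if not unsafe(i))
-- ===== Notes on version B (the rewrite author's own statement) =====
-- stated objective: alternative
-- what changed: B builds no data structures at all: instead of A's staged pipeline (Counter table, per-allergen candidate sets maintained by repeated set intersection, union of the candidate sets, then a sum over the table's unique keys), B tests each ingredient occurrence directly against the logical definition of 'unsafe' (exists an allergen such that the ingredient is in every food listing it) with a nested any/all scan over the food list.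
import Mathlib
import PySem

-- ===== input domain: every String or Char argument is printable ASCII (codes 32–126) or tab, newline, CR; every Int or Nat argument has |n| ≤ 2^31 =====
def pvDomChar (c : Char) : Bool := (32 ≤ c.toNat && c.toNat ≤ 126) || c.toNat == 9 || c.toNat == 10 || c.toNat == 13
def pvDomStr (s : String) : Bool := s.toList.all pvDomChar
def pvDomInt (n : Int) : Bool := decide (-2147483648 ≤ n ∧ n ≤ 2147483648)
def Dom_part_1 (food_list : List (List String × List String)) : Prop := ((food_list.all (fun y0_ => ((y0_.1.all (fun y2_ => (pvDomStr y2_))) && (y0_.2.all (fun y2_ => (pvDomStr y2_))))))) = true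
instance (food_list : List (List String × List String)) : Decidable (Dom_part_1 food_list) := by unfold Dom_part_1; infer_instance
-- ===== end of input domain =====

-- B replaces A's staged pipeline (Counter table, per-allergen candidate sets by repeated
-- intersection, union of values, sum over unique keys) by a direct nested any/all test of
-- the definition of "unsafe ingredient"; return-value equivalence only.

-- ===== PORT A =====
-- helper get_potentially_allergic_ingredients
def getPotAllergic (food_list : List (List String × List String)) :
    PySem.Dict String (PySem.Set String) :=
  food_list.foldl (fun d p =>
    p.2.foldl (fun d allergen =>
      d.insert allergen
        (PySem.Set.inter (d.getD allergen (PySem.Set.ofList p.1)) (PySem.Set.ofList p.1))) d)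
    PySem.Dict.empty

-- ingredient_counts: Counter updated food by food
def aCounts (food_list : List (List String × List String)) : PySem.Dict String Int :=
  food_list.foldl (fun d p => p.1.foldl (fun d x => d.modify x 0 (· + 1)) d) PySem.Dict.empty

-- unsafe_ingredients = set.union(*[...]): Python raises TypeError on an empty argument list,
-- those inputs are excluded by Pre_part_1; the [] branch below is unreachable under Pre_.
def aAllergenic (food_list : List (List String × List String)) : PySem.Set String :=
  match (getPotAllergic food_list).values with
  | [] => PySem.Set.empty
  | v :: rest => rest.foldl PySem.Set.union v

def part_1 (food_list : List (List String × List String)) : Int :=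
  (aCounts food_list).items.foldl
    (fun acc p => if PySem.Set.contains (aAllergenic food_list) p.1 then acc else acc + p.2) 0

-- ===== PORT B =====
-- unsafe(ingredient): some allergen occurs such that the ingredient is in EVERY food listing it
def bUnsafe (food_list : List (List String × List String)) (ingredient : String) : Bool :=
  food_list.any (fun p => p.2.any (fun a =>
    (food_list.filter (fun q => q.2.contains a)).all (fun q => q.1.contains ingredient)))

def part_1_alt (food_list : List (List String × List String)) : Int :=
  food_list.foldl (fun acc p =>
    p.1.foldl (fun acc i => if bUnsafe food_list i then acc else acc + 1) acc) 0

-- ===== PRECONDITION & SPEC =====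
-- Pre_ excludes exactly the inputs where every allergen list is empty: there A's
-- 'set.union(*[])' raises TypeError (A returns no value there).
def Pre_part_1 (food_list : List (List String × List String)) : Prop :=
  ∃ p ∈ food_list, p.2 ≠ []
instance (food_list : List (List String × List String)) : Decidable (Pre_part_1 food_list) := by
  unfold Pre_part_1; infer_instance

def pvWitness_part_1 : (List (List String × List String)) := [(["a", "b"], ["x"])]

def Spec_part_1 (food_list : List (List String × List String)) (out : Int) : Prop :=
  out = part_1_alt food_list
instance (food_list : List (List String × List String)) (out : Int) : Decidable (Spec_part_1 food_list out) := by
  unfold Spec_part_1; infer_instance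

-- ===== CLAIM (what is proved, stated in full; the proofs are below) =====
def Claim_equal_part_1 : Prop := ∀ (food_list : List (List String × List String)),
  Dom_part_1 food_list → Pre_part_1 food_list → Spec_part_1 food_list (part_1 food_list)

-- ===== LEMMAS AND PROOFS =====

-- 'a is a dict key with a candidate set containing x'
def memCand (d : PySem.Dict String (PySem.Set String)) (a x : String) : Prop :=
  ∃ s, d.get? a = some s ∧ x ∈ s

theorem contains_allergen_foldl (ing : List String) (al : List String)
    (d : PySem.Dict String (PySem.Set String)) (a : String) :
    (al.foldl (fun d allergen =>
      d.insert allergen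
        (PySem.Set.inter (d.getD allergen (PySem.Set.ofList ing)) (PySem.Set.ofList ing))) d).contains a = true
    ↔ (d.contains a = true ∨ a ∈ al) := by
  rw [PySem.Dict.contains_iff_mem_keys, PySem.Dict.keys_foldl_insert, PySem.Set.mem_update,
      ← PySem.Dict.contains_iff_mem_keys]

theorem memCand_allergen_foldl (ing : List String) (al : List String)
    (d : PySem.Dict String (PySem.Set String)) (a x : String) :
    memCand (al.foldl (fun d allergen =>
      d.insert allergen
        (PySem.Set.inter (d.getD allergen (PySem.Set.ofList ing)) (PySem.Set.ofList ing))) d) a x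
    ↔ ((memCand d a x ∨ (d.contains a = false ∧ a ∈ al)) ∧ (a ∈ al → x ∈ ing)) := by
  induction al generalizing d with
  | nil => simp
  | cons b rest ih =>
    rw [List.foldl_cons, ih]
    by_cases hab : a = b
    · subst hab
      rw [PySem.Dict.contains_insert_self]
      have hmc : memCand (d.insert a
            (PySem.Set.inter (d.getD a (PySem.Set.ofList ing)) (PySem.Set.ofList ing))) a x
          ↔ (x ∈ d.getD a (PySem.Set.ofList ing) ∧ x ∈ PySem.Set.ofList ing) := by
        unfold memCand
        simp [PySem.Dict.get?_insert_self, PySem.Set.mem_inter]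
      rw [hmc]
      cases hg : d.get? a with
      | none =>
        have hc : d.contains a = false := by
          rw [PySem.Dict.contains_eq_isSome_get?, hg]; rfl
        rw [PySem.Dict.getD_of_get?_eq_none d (PySem.Set.ofList ing) hg]
        simp only [memCand, hg, PySem.Set.mem_ofList, hc, List.mem_cons, Bool.true_eq_false,
          false_and, or_false]
        tauto
      | some s =>
        have hc : d.contains a = true := by
          rw [PySem.Dict.contains_eq_isSome_get?, hg]; rfl
        rw [PySem.Dict.getD_of_get?_eq_some d (PySem.Set.ofList ing) hg]
        simp only [memCand, hg, PySem.Set.mem_ofList, hc, Option.some.injEq, List.mem_cons,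
          Bool.true_eq_false, false_and, or_false, exists_eq_left']
        tauto
    · have hmc : memCand (d.insert b
            (PySem.Set.inter (d.getD b (PySem.Set.ofList ing)) (PySem.Set.ofList ing))) a x
          ↔ memCand d a x := by
        unfold memCand
        rw [PySem.Dict.get?_insert_of_ne d _ hab]
      have hcc : (d.insert b
            (PySem.Set.inter (d.getD b (PySem.Set.ofList ing)) (PySem.Set.ofList ing))).contains a
          = d.contains a := by
        rw [PySem.Dict.contains_insert d b a _]
        simp [hab]
      rw [hmc, hcc]
      simp only [List.mem_cons]
      tauto

theorem memCand_food_foldl (fl : List (List String × List String))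
    (d : PySem.Dict String (PySem.Set String)) (a x : String) :
    memCand (fl.foldl (fun d p =>
      p.2.foldl (fun d allergen =>
        d.insert allergen
          (PySem.Set.inter (d.getD allergen (PySem.Set.ofList p.1)) (PySem.Set.ofList p.1))) d) d) a x
    ↔ ((memCand d a x ∨ (d.contains a = false ∧ ∃ q ∈ fl, a ∈ q.2)) ∧
       ∀ q ∈ fl, a ∈ q.2 → x ∈ q.1) := by
  induction fl generalizing d with
  | nil => simp
  | cons p rest ih =>
    rw [List.foldl_cons, ih, memCand_allergen_foldl]
    have hcs : ((p.2.foldl (fun d allergen =>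
        d.insert allergen
          (PySem.Set.inter (d.getD allergen (PySem.Set.ofList p.1)) (PySem.Set.ofList p.1))) d).contains a = false)
        ↔ ¬ (d.contains a = true ∨ a ∈ p.2) := by
      rw [← contains_allergen_foldl p.1 p.2 d a]
      simp
    simp only [List.mem_cons]
    constructor
    · rintro ⟨h1 | ⟨h2, q, hq, ha⟩, hr⟩
      · rcases h1 with ⟨hm, hpx⟩
        have hall : ∀ q, q = p ∨ q ∈ rest → a ∈ q.2 → x ∈ q.1 := by
          rintro q (rfl | hq) haq
          · exact hpx haq
          · exact hr q hq haq
        rcases hm with hm | ⟨hc, hap⟩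
        · exact ⟨Or.inl hm, hall⟩
        · exact ⟨Or.inr ⟨hc, p, Or.inl rfl, hap⟩, hall⟩
      · rw [hcs] at h2
        push Not at h2
        have hall : ∀ q', q' = p ∨ q' ∈ rest → a ∈ q'.2 → x ∈ q'.1 := by
          rintro q' (rfl | hq') haq'
          · exact absurd haq' h2.2
          · exact hr q' hq' haq'
        exact ⟨Or.inr ⟨by simpa using h2.1, q, Or.inr hq, ha⟩, hall⟩
    · rintro ⟨h1, hr⟩
      have hrest : ∀ q ∈ rest, a ∈ q.2 → x ∈ q.1 := fun q hq => hr q (Or.inr hq)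
      have hpx : a ∈ p.2 → x ∈ p.1 := fun h => hr p (Or.inl rfl) h
      rcases h1 with hm | ⟨hc, q, hq, ha⟩
      · exact ⟨Or.inl ⟨Or.inl hm, hpx⟩, hrest⟩
      · rcases hq with rfl | hq
        · exact ⟨Or.inl ⟨Or.inr ⟨hc, ha⟩, hpx⟩, hrest⟩
        · by_cases hap : a ∈ p.2
          · exact ⟨Or.inl ⟨Or.inr ⟨hc, hap⟩, hpx⟩, hrest⟩
          · refine ⟨Or.inr ⟨?_, q, hq, ha⟩, hrest⟩
            rw [hcs]
            push Not
            exact ⟨by simp [hc], hap⟩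

theorem nodup_keys_getPot (fl : List (List String × List String)) :
    (getPotAllergic fl).keys.Nodup := by
  unfold getPotAllergic
  generalize hd : (PySem.Dict.empty : PySem.Dict String (PySem.Set String)) = d
  have hnd : d.keys.Nodup := by rw [← hd]; exact PySem.Dict.nodup_keys_empty
  clear hd
  induction fl generalizing d with
  | nil => exact hnd
  | cons p rest ih =>
    rw [List.foldl_cons]
    exact ih _ (PySem.Dict.nodup_keys_foldl_insert _ _ _ hnd)

theorem mem_foldl_union {α : Type} [BEq α] [LawfulBEq α]
    (rest : List (PySem.Set α)) (acc : PySem.Set α) (x : α) :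
    x ∈ rest.foldl PySem.Set.union acc ↔ x ∈ acc ∨ ∃ s ∈ rest, x ∈ s := by
  induction rest generalizing acc with
  | nil => simp
  | cons v t ih =>
    rw [List.foldl_cons, ih, PySem.Set.mem_union]
    simp only [List.mem_cons]
    constructor
    · rintro (⟨h | h⟩ | ⟨s, hs, hx⟩)
      · exact Or.inl h
      · exact Or.inr ⟨v, Or.inl rfl, h⟩
      · exact Or.inr ⟨s, Or.inr hs, hx⟩
    · rintro (h | ⟨s, (rfl | hs), hx⟩)
      · exact Or.inl (Or.inl h)
      · exact Or.inl (Or.inr hx)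
      · exact Or.inr ⟨s, hs, hx⟩

theorem mem_aAllergenic (fl : List (List String × List String)) (x : String) :
    PySem.Set.contains (aAllergenic fl) x = true
    ↔ ∃ a, (∃ q ∈ fl, a ∈ q.2) ∧ ∀ q ∈ fl, a ∈ q.2 → x ∈ q.1 := by
  rw [PySem.Set.contains_iff]
  have hval : x ∈ aAllergenic fl ↔ ∃ s ∈ (getPotAllergic fl).values, x ∈ s := by
    unfold aAllergenic
    cases hv : (getPotAllergic fl).values with
    | nil => simp [PySem.Set.empty]
    | cons v rest =>
      show x ∈ rest.foldl PySem.Set.union v ↔ _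
      rw [mem_foldl_union]
      simp
  rw [hval]
  have hmc : (∃ s ∈ (getPotAllergic fl).values, x ∈ s) ↔ ∃ a, memCand (getPotAllergic fl) a x := by
    constructor
    · rintro ⟨s, hs, hx⟩
      rcases List.mem_map.mp hs with ⟨⟨a, s'⟩, hmem, rfl⟩
      exact ⟨a, s', PySem.Dict.get?_of_mem_items _ hmem (nodup_keys_getPot fl), hx⟩
    · rintro ⟨a, s, hg, hx⟩
      exact ⟨s, List.mem_map.mpr ⟨(a, s), PySem.Dict.mem_items_of_get?_eq_some _ hg, rfl⟩, hx⟩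
  rw [hmc]
  constructor
  · rintro ⟨a, hm⟩
    rw [getPotAllergic, memCand_food_foldl] at hm
    rcases hm with ⟨h1, h2⟩
    rcases h1 with ⟨s, hs, _⟩ | ⟨_, hE⟩
    · rw [PySem.Dict.get?_empty] at hs; exact absurd hs (by simp)
    · exact ⟨a, hE, h2⟩
  · rintro ⟨a, hE, hall⟩
    refine ⟨a, ?_⟩
    rw [getPotAllergic, memCand_food_foldl]
    exact ⟨Or.inr ⟨PySem.Dict.contains_empty a, hE⟩, hall⟩

theorem bUnsafe_eq (fl : List (List String × List String)) (x : String) :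
    bUnsafe fl x = PySem.Set.contains (aAllergenic fl) x := by
  rw [Bool.eq_iff_iff, mem_aAllergenic]
  unfold bUnsafe
  simp only [List.any_eq_true, List.all_eq_true, List.mem_filter, List.contains_iff_mem]
  constructor
  · rintro ⟨p, hp, a, ha, hall⟩
    exact ⟨a, ⟨p, hp, ha⟩, fun q hq haq => hall q ⟨hq, haq⟩⟩
  · rintro ⟨a, ⟨p, hp, ha⟩, hall⟩
    exact ⟨p, hp, a, ha, fun q hq => hall q hq.1 hq.2⟩

theorem sum_count_distinct {α : Type} [BEq α] [LawfulBEq α] (S : List α) (F : List α)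
    (hS : S.Nodup) (hF : ∀ x ∈ F, x ∈ S) :
    (S.map (fun k => F.count k)).sum = F.length := by
  induction S generalizing F with
  | nil =>
    cases F with
    | nil => rfl
    | cons a t => exact absurd (hF a (by simp)) (by simp)
  | cons a S' ih =>
    simp only [List.nodup_cons] at hS
    have hrec := ih (F.filter (fun x => !(x == a))) hS.2 ?_
    · simp only [List.map_cons, List.sum_cons]
      have hct : ∀ k ∈ S', F.count k = (F.filter (fun x => !(x == a))).count k := by
        intro k hk
        have hne : k ≠ a := fun h => hS.1 (h ▸ hk)
        exact (List.count_filter (by simpa using hne)).symm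
      rw [List.map_congr_left hct, hrec]
      have h2 := List.length_eq_countP_add_countP (fun x => x == a) (l := F)
      simp only [decide_not, Bool.decide_eq_true] at h2
      rw [← List.countP_eq_length_filter, List.count]
      omega
    · intro x hx
      simp only [List.mem_filter, Bool.not_eq_true', beq_eq_false_iff_ne] at hx
      have := hF x hx.1
      simp only [List.mem_cons] at this
      tauto

theorem aCounts_eq (food_list : List (List String × List String)) :
    aCounts food_list = PySem.Dict.counter (food_list.flatMap (·.1)) := by
  unfold aCounts
  rw [PySem.Dict.counter_eq_foldl, List.foldl_flatMap]

-- ===== VERDICT (by name: the statement is the Claim_ definition above) =====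
theorem part_1_spec : Claim_equal_part_1 := by
  intro food_list _ _
  unfold Spec_part_1 part_1 part_1_alt
  simp only [bUnsafe_eq]
  set q : String → Bool := fun i => PySem.Set.contains (aAllergenic food_list) i with hq
  set L : List String := food_list.flatMap (·.1) with hL
  -- B side: one double loop = countP over all occurrences
  have hB : food_list.foldl (fun acc p =>
      p.1.foldl (fun acc i => if q i then acc else acc + 1) acc) 0
      = ((L.countP (fun i => !q i) : Nat) : Int) := by
    rw [← List.foldl_flatMap, ← hL]
    have hf : (fun (acc : Int) i => if q i then acc else acc + 1)
        = (fun acc i => if (!q i) = true then acc + 1 else acc) := by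
      funext acc i; cases h : q i
      · simp
      · simp
    rw [hf, PySem.List.foldl_count_if, zero_add]
  -- A side: sum over the counter's items
  have hA : (aCounts food_list).items.foldl
      (fun acc p => if q p.1 then acc else acc + p.2) 0
      = ((L.countP (fun i => !q i) : Nat) : Int) := by
    rw [aCounts_eq, ← hL, PySem.Dict.items_counter, List.foldl_map]
    have hf : (fun (acc : Int) k => if q k then acc else acc + ((L.count k : Nat) : Int))
        = (fun acc k => acc + (if q k then 0 else ((L.count k : Nat) : Int))) := by
      funext acc k; cases h : q k
      · simp
      · simp
    rw [hf, PySem.List.foldl_add, zero_add]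
    have hcnt : ∀ k, (if q k then 0 else ((L.count k : Nat) : Int))
        = (((L.filter (fun i => !q i)).count k : Nat) : Int) := by
      intro k
      cases h : q k with
      | true =>
        have : k ∉ L.filter (fun i => !q i) := by
          intro hk
          simp only [List.mem_filter, h, Bool.not_true] at hk
          exact absurd hk.2 (by simp)
        simp [List.count_eq_zero.mpr this]
      | false => rw [if_neg (by simp), List.count_filter (by simp [h])]
    rw [funext hcnt]
    have hperm : (PySem.Set.ofList L).map
        (fun k => (((L.filter (fun i => !q i)).count k : Nat) : Int))
        = ((PySem.Set.ofList L).map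
            (fun k => ((L.filter (fun i => !q i)).count k : Nat))).map Nat.cast := by
      rw [List.map_map]; rfl
    rw [hperm, ← Nat.cast_list_sum,
        sum_count_distinct (PySem.Set.ofList L) (L.filter (fun i => !q i))
          (PySem.Set.nodup_ofList L)
          (fun x hx => (PySem.Set.mem_ofList L x).mpr (List.mem_of_mem_filter hx)),
        ← List.countP_eq_length_filter]
  rw [hA, hB]
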